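-- pv_equiv track=rewrite | github.com/zacharysgoldberg/data-structures-and-algorithms | searching/binary_search.py | shuffle_list_rec
-- ===== SOURCE A (Python) =====
-- def shuffle_list_rec(lst, low, high):
--     if high - low > 1:
--         mid = (low + high) // 2
--         left = (low + mid) // 2
--         right = mid + 1
--         for i in range(left + 1, mid + 1):
--             lst[i], lst[right] = lst[right], lst[i]
--             right += 1
--
--         shuffle_list_rec(lst, low, mid)
--         shuffle_list_rec(lst, mid + 1, high)
--     return lst
-- ===== SOURCE B (Python) =====
-- def shuffle_list_rec(lst, low, high):
--     # Iterative version: an explicit LIFO stack of (lo, hi) ranges replaces the recursion.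
--     stack = [(low, high)]
--     while stack:
--         lo, hi = stack.pop()
--         if hi - lo > 1:
--             mid = (lo + hi) // 2
--             left = (lo + mid) // 2
--             right = mid + 1
--             for i in range(left + 1, mid + 1):
--                 lst[i], lst[right] = lst[right], lst[i]
--                 right += 1
--             stack.append((mid + 1, hi))
--             stack.append((lo, mid))
--     return lst
-- ===== Notes on version B (the rewrite author's own statement) =====
-- stated objective: alternative
-- what changed: Replaces the recursion by an iterative worklist: an explicit LIFO stack of (lo, hi) ranges is popped in a while loop, each node's interleaving swaps are done before its two sub-ranges are pushed, reproducing A's exact swap order without recursion.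
import Mathlib
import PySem

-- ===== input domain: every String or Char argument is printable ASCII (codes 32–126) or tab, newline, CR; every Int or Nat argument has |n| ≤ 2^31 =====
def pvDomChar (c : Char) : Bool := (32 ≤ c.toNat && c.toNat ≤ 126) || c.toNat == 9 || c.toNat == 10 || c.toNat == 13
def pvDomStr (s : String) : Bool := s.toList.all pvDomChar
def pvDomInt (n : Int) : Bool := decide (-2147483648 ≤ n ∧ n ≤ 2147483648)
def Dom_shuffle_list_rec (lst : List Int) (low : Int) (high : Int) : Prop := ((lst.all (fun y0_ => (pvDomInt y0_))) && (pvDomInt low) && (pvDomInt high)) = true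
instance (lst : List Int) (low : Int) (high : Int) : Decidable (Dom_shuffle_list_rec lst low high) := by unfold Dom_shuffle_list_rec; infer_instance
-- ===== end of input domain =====

-- B replaces A's recursion by an explicit LIFO stack of (lo, hi) ranges (same in-place swaps, same
-- order); both Pythons mutate lst in place identically, and the proved equivalence is of the RETURN value.

-- ===== PORT A =====
-- shared swap-statement helper: `lst[i], lst[right] = lst[right], lst[i]` — the for-loop body is
-- textually identical in Source A and Source B, so both ports use it. pyGetD/pySetD are exact on the
-- in-range indices Pre_ admits (Python raises IndexError outside; those inputs are outside Pre_).
def pvSwap (xs : List Int) (i j : Int) : List Int :=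
  let a := PySem.List.pyGetD xs j 0
  let b := PySem.List.pyGetD xs i 0
  PySem.List.pySetD (PySem.List.pySetD xs i a) j b

-- `right = mid + 1; for i in range(left + 1, mid + 1): swap; right += 1`
def pvSwapLoop (xs : List Int) (left mid : Int) : List Int :=
  ((PySem.List.pyRange (left + 1) (mid + 1) 1).foldl
    (fun st i => (pvSwap st.1 i st.2, st.2 + 1)) (xs, mid + 1)).1

-- termination facts for both ports (cited by name in decreasing_by; proved by hand to keep
-- the ports' proof terms small)
theorem pv_mid_lb (lo hi : Int) (h : hi - lo > 1) : lo + 1 ≤ PySem.Int.floordiv (lo + hi) 2 := by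
  refine (PySem.Int.le_floordiv_iff_mul_le (by norm_num)).mpr ?_
  have h2 : lo + 2 ≤ hi := Int.add_le_of_le_sub_left (Int.lt_iff_add_one_le.mp h)
  calc (lo + 1) * 2 = lo + (lo + 2) := by ring
    _ ≤ lo + hi := Int.add_le_add_left h2 lo

theorem pv_mid_ub (lo hi : Int) (h : hi - lo > 1) : PySem.Int.floordiv (lo + hi) 2 < hi := by
  refine (PySem.Int.floordiv_lt_iff_lt_mul (by norm_num)).mpr ?_
  have hlt : lo < hi := Int.sub_pos.mp (lt_trans Int.zero_lt_one h)
  calc lo + hi < hi + hi := Int.add_lt_add_right hlt hi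
    _ = hi * 2 := by ring

theorem pv_mid_lt (low high : Int) (h : high - low > 1) :
    (PySem.Int.floordiv (low + high) 2 - low).toNat < (high - low).toNat :=
  (Int.toNat_lt_toNat (lt_trans Int.zero_lt_one h)).mpr
    (sub_lt_sub_right (pv_mid_ub low high h) low)

theorem pv_high_lt (low high : Int) (h : high - low > 1) :
    (high - (PySem.Int.floordiv (low + high) 2 + 1)).toNat < (high - low).toNat :=
  (Int.toNat_lt_toNat (lt_trans Int.zero_lt_one h)).mpr
    (sub_lt_sub_left
      (lt_trans (lt_of_lt_of_le (lt_add_one low) (pv_mid_lb low high h)) (lt_add_one _)) high)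

def shuffle_list_rec (lst : List Int) (low : Int) (high : Int) : List Int :=
  if h : high - low > 1 then
    let mid := PySem.Int.floordiv (low + high) 2
    let left := PySem.Int.floordiv (low + mid) 2
    shuffle_list_rec (shuffle_list_rec (pvSwapLoop lst left mid) low mid) (mid + 1) high
  else lst
termination_by (high - low).toNat
decreasing_by
  · exact pv_mid_lt low high h
  · exact pv_high_lt low high h

-- ===== PORT B =====
-- `stack = [(low, high)]; while stack: lo, hi = stack.pop(); …` — head of the list is the top of
-- the stack; pushing (mid+1, hi) then (lo, mid) makes the next pop (lo, mid).
theorem pv_stack_dec1 (lo hi : Int) (rest : List (Int × Int)) (h : hi - lo > 1) :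
    (((lo, PySem.Int.floordiv (lo + hi) 2) :: (PySem.Int.floordiv (lo + hi) 2 + 1, hi) :: rest).map
        (fun p => 2 * (p.2 - p.1).toNat + 1)).sum <
      (((lo, hi) :: rest).map (fun p => 2 * (p.2 - p.1).toNat + 1)).sum := by
  simp only [List.map_cons, List.sum_cons]
  have h1 := pv_mid_lb lo hi h
  have h2 := pv_mid_ub lo hi h
  have e1 : (0:Int) ≤ PySem.Int.floordiv (lo + hi) 2 - lo :=
    sub_nonneg.mpr (le_of_lt (lt_of_lt_of_le (lt_add_one lo) h1))
  have e2 : (0:Int) ≤ hi - (PySem.Int.floordiv (lo + hi) 2 + 1) :=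
    sub_nonneg.mpr (Int.add_one_le_iff.mpr h2)
  have key : (PySem.Int.floordiv (lo + hi) 2 - lo).toNat +
      (hi - (PySem.Int.floordiv (lo + hi) 2 + 1)).toNat + 1 ≤ (hi - lo).toNat := by
    rw [← Int.toNat_add e1 e2]
    have e3 : PySem.Int.floordiv (lo + hi) 2 - lo + (hi - (PySem.Int.floordiv (lo + hi) 2 + 1))
        = hi - lo - 1 := by ring
    rw [e3]
    exact Nat.succ_le_of_lt
      ((Int.toNat_lt_toNat (lt_trans Int.zero_lt_one h)).mpr (sub_one_lt _))
  generalize (PySem.Int.floordiv (lo + hi) 2 - lo).toNat = a at key ⊢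
  generalize (hi - (PySem.Int.floordiv (lo + hi) 2 + 1)).toNat = b at key ⊢
  generalize (hi - lo).toNat = c at key ⊢
  generalize (rest.map (fun p => 2 * (p.2 - p.1).toNat + 1)).sum = S
  calc 2 * a + 1 + (2 * b + 1 + S) = 2 * (a + b + 1) + S := by ring
    _ ≤ 2 * c + S := Nat.add_le_add_right (Nat.mul_le_mul_left 2 key) S
    _ < 2 * c + 1 + S := Nat.add_lt_add_right (Nat.lt_succ_self (2 * c)) S

theorem pv_stack_dec2 (lo hi : Int) (rest : List (Int × Int)) :
    (rest.map (fun p => 2 * (p.2 - p.1).toNat + 1)).sum <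
      (((lo, hi) :: rest).map (fun p => 2 * (p.2 - p.1).toNat + 1)).sum := by
  simp only [List.map_cons, List.sum_cons]
  exact Nat.lt_add_of_pos_left (Nat.succ_pos _)

def pvLoop : List (Int × Int) → List Int → List Int
  | [], lst => lst
  | (lo, hi) :: rest, lst =>
    if h : hi - lo > 1 then
      let mid := PySem.Int.floordiv (lo + hi) 2
      let left := PySem.Int.floordiv (lo + mid) 2
      pvLoop ((lo, mid) :: (mid + 1, hi) :: rest) (pvSwapLoop lst left mid)
    else pvLoop rest lst
termination_by stack _ => (stack.map (fun p => 2 * (p.2 - p.1).toNat + 1)).sum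
decreasing_by
  · exact pv_stack_dec1 lo hi rest h
  · exact pv_stack_dec2 lo hi rest

def shuffle_list_rec_alt (lst : List Int) (low : Int) (high : Int) : List Int :=
  pvLoop [(low, high)] lst

-- ===== PRECONDITION & SPEC =====
-- Exactly the inputs on which the Python A returns normally: when high - low ≥ 2 the recursion
-- accesses precisely the indices low+1 (its minimum) up to low+g(high-low) (its maximum), where
-- g(n) = n when the two top bits of n+1 are both set (i.e. 3*2^(bitlen(n+1)-2) ≤ n+1, equivalently
-- n ∈ {2} ∪ [3*2^k - 1, 4*2^k - 2] for some k ≥ 1), and g(n) = n - 1 otherwise;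
-- Python raises IndexError iff one of these two extremes leaves [-len(lst), len(lst)-1].
def Pre_shuffle_list_rec (lst : List Int) (low : Int) (high : Int) : Prop :=
  high - low ≤ 1 ∨
    (-(lst.length : Int) ≤ low + 1 ∧
      low + (if 3 * (2 : Int) ^ (PySem.Int.bitLength (high - low + 1) - 2) ≤ high - low + 1
             then high - low else high - low - 1) < (lst.length : Int))
instance (lst : List Int) (low : Int) (high : Int) : Decidable (Pre_shuffle_list_rec lst low high) := by
  unfold Pre_shuffle_list_rec; infer_instance

def pvWitness_shuffle_list_rec : List Int × Int × Int := ([10, 20, 30, 40, 50, 60, 70], 0, 7)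

def Spec_shuffle_list_rec (lst : List Int) (low : Int) (high : Int) (out : List Int) : Prop := out = shuffle_list_rec_alt lst low high
instance (lst : List Int) (low : Int) (high : Int) (out : List Int) : Decidable (Spec_shuffle_list_rec lst low high out) := by unfold Spec_shuffle_list_rec; infer_instance

-- ===== CLAIM (what is proved, stated in full; the proofs are below) =====
def Claim_equal_shuffle_list_rec : Prop := ∀ (lst : List Int) (low : Int) (high : Int), Dom_shuffle_list_rec lst low high → Pre_shuffle_list_rec lst low high → Spec_shuffle_list_rec lst low high (shuffle_list_rec lst low high)

-- ===== LEMMAS AND PROOFS =====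

-- A's one-step unfoldings, in the shape pvLoop produces.
theorem shuffle_step (lst : List Int) (low high : Int) (h : high - low > 1) :
    shuffle_list_rec lst low high =
      shuffle_list_rec
        (shuffle_list_rec
          (pvSwapLoop lst (PySem.Int.floordiv (low + PySem.Int.floordiv (low + high) 2) 2)
            (PySem.Int.floordiv (low + high) 2))
          low (PySem.Int.floordiv (low + high) 2))
        (PySem.Int.floordiv (low + high) 2 + 1) high := by
  conv_lhs => rw [shuffle_list_rec]
  simp only [dif_pos h]

theorem shuffle_base (lst : List Int) (low high : Int) (h : ¬ high - low > 1) :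
    shuffle_list_rec lst low high = lst := by
  conv_lhs => rw [shuffle_list_rec]
  simp only [dif_neg h]

-- B's stack loop folds A's recursion over the pending ranges: processing the whole stack equals
-- running A on each pending range in turn (top of stack first).
theorem pvLoop_eq_foldl (stack : List (Int × Int)) (lst : List Int) :
    pvLoop stack lst = stack.foldl (fun l p => shuffle_list_rec l p.1 p.2) lst := by
  induction stack, lst using pvLoop.induct with
  | case1 lst => rw [pvLoop]; rfl
  | case2 lo hi rest lst h mid left ih =>
      rw [pvLoop]
      simp only [dif_pos h]
      rw [ih]
      simp only [List.foldl_cons]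
      rw [shuffle_step lst lo hi h]
  | case3 lo hi rest lst h ih =>
      rw [pvLoop]
      simp only [dif_neg h]
      rw [ih]
      simp only [List.foldl_cons]
      rw [shuffle_base lst lo hi h]

-- ===== VERDICT (by name: the statement is the Claim_ definition above) =====
theorem shuffle_list_rec_spec : Claim_equal_shuffle_list_rec := by
  intro lst low high _ _
  unfold Spec_shuffle_list_rec shuffle_list_rec_alt
  rw [pvLoop_eq_foldl]
  simp only [List.foldl_cons, List.foldl_nil]
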